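-- pv_equiv track=rewrite | github.com/MIcft/CK-PY1 | Лабораторная работа 4/Task_1.py | get_count_char
-- ===== SOURCE A (Python) =====
-- def get_count_char(str_):
--     separate_list = str_.lower().split()
--     separate_list.sort()
--     list_ = ' '.join(separate_list)
--     alphabet_dict = {}
--     for letter in list_:
--         if letter in alphabet_dict :
--             alphabet_dict[letter] += 1
--         elif letter.isalpha():
--             alphabet_dict[letter] = 1
--     return alphabet_dict
-- ===== SOURCE B (Python) =====
-- def get_count_char(str_):
--     letters = [c for c in ' '.join(sorted(str_.lower().split())) if c.isalpha()]
--     return {c: letters.count(c) for c in dict.fromkeys(letters)}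
-- ===== Notes on version B (the rewrite author's own statement) =====
-- stated objective: simpler
-- what changed: Replaces the running dict-accumulation loop (membership test + increment / conditional insert per character) with a direct construction: filter the alphabetic characters once, enumerate the distinct ones in first-appearance order via dict.fromkeys, and compute each value by a fresh letters.count scan.
import Mathlib
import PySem

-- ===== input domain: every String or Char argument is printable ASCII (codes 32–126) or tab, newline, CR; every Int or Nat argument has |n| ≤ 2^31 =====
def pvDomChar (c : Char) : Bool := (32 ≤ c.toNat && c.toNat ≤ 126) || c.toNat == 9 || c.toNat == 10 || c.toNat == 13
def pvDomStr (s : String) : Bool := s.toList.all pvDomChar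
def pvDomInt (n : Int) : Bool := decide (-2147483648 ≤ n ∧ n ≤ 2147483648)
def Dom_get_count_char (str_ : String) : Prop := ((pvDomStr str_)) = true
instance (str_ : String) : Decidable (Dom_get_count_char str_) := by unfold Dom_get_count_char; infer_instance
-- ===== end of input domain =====

-- B replaces A's running dict-accumulation loop by a direct construction (filter, dedup, count per
-- distinct letter) for simplicity; equal output on every input (A is total).

-- ===== PORT A =====
-- the loop body of A: membership test, then increment / conditional insert (dict keyed by the char)
def pvStepA (d : PySem.Dict Char Int) (c : Char) : PySem.Dict Char Int :=
  if d.contains c then d.modify c 0 (· + 1)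
  else if PySem.Chars.isalpha c then d.insert c 1
  else d

def get_count_char (str_ : String) : List (String × Int) :=
  let separate_list := PySem.Str.split₀ (PySem.Str.lower str_)
  let separate_list := PySem.List.sorted separate_list (fun w => w) false
  let list_ := PySem.Str.join " " separate_list
  let alphabet_dict := list_.toList.foldl pvStepA PySem.Dict.empty
  -- the Python dict's single-char string keys rendered as Strings at return
  alphabet_dict.items.map (fun p => (String.ofList [p.1], p.2))

-- ===== PORT B =====
def get_count_char_alt (str_ : String) : List (String × Int) :=
  let letters := (PySem.Str.join " " (PySem.List.sorted (PySem.Str.split₀ (PySem.Str.lower str_)) (fun w => w) false)).toList.filter PySem.Chars.isalpha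
  (PySem.List.dedup letters).map (fun c => (String.ofList [c], (letters.count c : Int)))

-- ===== PRECONDITION & SPEC =====
def Spec_get_count_char (str_ : String) (out : List (String × Int)) : Prop := out = get_count_char_alt str_
instance (str_ : String) (out : List (String × Int)) : Decidable (Spec_get_count_char str_ out) := by unfold Spec_get_count_char; infer_instance

-- ===== CLAIM (what is proved, stated in full; the proofs are below) =====
def Claim_equal_get_count_char : Prop := ∀ (str_ : String), Dom_get_count_char str_ → Spec_get_count_char str_ (get_count_char str_)

-- ===== LEMMAS AND PROOFS =====


-- keys of A's fold: the distinct alphabetic characters, in first-appearance order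
theorem pv_keysA (l : List Char) (d : PySem.Dict Char Int) :
    (l.foldl pvStepA d).keys = PySem.Set.update d.keys (l.filter PySem.Chars.isalpha) := by
  induction l generalizing d with
  | nil => simp [PySem.Set.update_nil]
  | cons x l ih =>
    simp only [List.foldl_cons, List.filter_cons]
    by_cases hc : d.contains x = true
    · have hmem : x ∈ d.keys := (PySem.Dict.contains_iff_mem_keys d x).1 hc
      have hk : (pvStepA d x).keys = d.keys := by
        simp [pvStepA, hc, PySem.Dict.keys_modify, PySem.Dict.keys_insert_of_contains _ _ hc]
      by_cases ha : PySem.Chars.isalpha x = true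
      · rw [if_pos ha, PySem.Set.update_cons, PySem.Set.add_of_mem hmem, ih, hk]
      · rw [if_neg ha, ih, hk]
    · have hc' : d.contains x = false := by simpa using hc
      have hnm : x ∉ d.keys := fun h => hc ((PySem.Dict.contains_iff_mem_keys d x).2 h)
      by_cases ha : PySem.Chars.isalpha x = true
      · have hk : (pvStepA d x).keys = d.keys ++ [x] := by
          simp [pvStepA, hc', ha, PySem.Dict.keys_insert_of_not_contains _ _ hc']
        rw [if_pos ha, PySem.Set.update_cons, PySem.Set.add_of_not_mem hnm, ih, hk]
      · have hk : pvStepA d x = d := by simp [pvStepA, hc', ha]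
        rw [if_neg ha, ih, hk]

-- value of A's fold at an alphabetic key: starting value plus the number of occurrences
theorem pv_getDA (l : List Char) (c : Char) (hca : PySem.Chars.isalpha c = true)
    (d : PySem.Dict Char Int) :
    (l.foldl pvStepA d).getD c 0 = d.getD c 0 + l.count c := by
  induction l generalizing d with
  | nil => simp
  | cons x l ih =>
    rw [List.foldl_cons, ih, List.count_cons]
    by_cases hx : x = c
    · subst hx
      by_cases hc : d.contains x = true
      · have : (pvStepA d x).getD x 0 = d.getD x 0 + 1 := by
          simp [pvStepA, hc, PySem.Dict.getD_modify_self]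
        rw [this]; simp; ring
      · have hc' : d.contains x = false := by simpa using hc
        have h0 : d.getD x 0 = 0 := PySem.Dict.getD_of_not_contains _ _ hc'
        have : (pvStepA d x).getD x 0 = 1 := by
          simp [pvStepA, hc', hca, PySem.Dict.getD_insert_self]
        rw [this, h0]; simp; ring
    · have hne : c ≠ x := fun h => hx h.symm
      have hbe : (x == c) = false := by simpa using hx
      have : (pvStepA d x).getD c 0 = d.getD c 0 := by
        unfold pvStepA
        split_ifs with h1 h2
        · exact PySem.Dict.getD_modify_of_ne _ _ _ hne
        · exact PySem.Dict.getD_insert_of_ne _ _ _ hne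
        · rfl
      rw [this, hbe]; simp

theorem pv_main (L : List Char) :
    (L.foldl pvStepA PySem.Dict.empty).items.map (fun p => (String.ofList [p.1], p.2)) =
      (PySem.List.dedup (L.filter PySem.Chars.isalpha)).map
        (fun c => (String.ofList [c], ((L.filter PySem.Chars.isalpha).count c : Int))) := by
  have hkeys : (L.foldl pvStepA PySem.Dict.empty).keys
      = PySem.List.dedup (L.filter PySem.Chars.isalpha) := by
    rw [pv_keysA]
    simp [PySem.Dict.keys_empty, PySem.Set.update_nil_left, PySem.List.dedup_eq_ofList]
  have hnd : (L.foldl pvStepA PySem.Dict.empty).keys.Nodup := by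
    rw [hkeys]; simp [PySem.List.dedup_eq_ofList, PySem.Set.nodup_ofList]
  rw [PySem.Dict.items_eq_map_keys _ hnd 0, hkeys, List.map_map]
  apply List.map_congr_left
  intro c hc
  have hcl : c ∈ L.filter PySem.Chars.isalpha := by
    simpa [PySem.List.dedup_eq_ofList, PySem.Set.mem_ofList] using hc
  have hca : PySem.Chars.isalpha c = true := (List.mem_filter.1 hcl).2
  have hcount : (L.filter PySem.Chars.isalpha).count c = L.count c :=
    List.count_filter (p := PySem.Chars.isalpha) (a := c) (l := L) hca
  have hg : (L.foldl pvStepA PySem.Dict.empty).getD c 0 = (L.count c : Int) := by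
    rw [pv_getDA L c hca]; simp
  simp [Function.comp, hg, hcount]

-- ===== VERDICT (by name: the statement is the Claim_ definition above) =====
theorem get_count_char_spec : Claim_equal_get_count_char := by
  intro str_ _
  unfold Spec_get_count_char get_count_char get_count_char_alt
  exact pv_main ((PySem.Str.join " " (PySem.List.sorted (PySem.Str.split₀ (PySem.Str.lower str_)) (fun w => w) false)).toList)
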